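-- pv_equiv track=rewrite | github.com/styffstyff/Projet-Labyrinthe_NSI | solve.py | check
-- ===== SOURCE A (Python) =====
-- def go_N(pos): return (pos[0]-1, pos[1])
--
-- def go_S(pos): return (pos[0]+1, pos[1])
--
-- def go_E(pos): return (pos[0], pos[1]+1)
--
-- def go_W(pos): return (pos[0], pos[1]-1)
--
-- def check(maze, start, end, solution):
--     pos = start
--     for direction in solution:
--         if direction == 'N':
--             pos = go_N(pos)
--         elif direction == 'S':
--             pos = go_S(pos)
--         elif direction == 'E':
--             pos = go_E(pos)
--         else:
--             pos = go_W(pos)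
--
--         if maze[pos[0]][pos[1]] == 1:
--             return False
--
--     if pos == end:
--         return True
--     return False
-- ===== SOURCE B (Python) =====
-- def check(maze, start, end, solution):
--     deltas = {'N': (-1, 0), 'S': (1, 0), 'E': (0, 1)}
--
--     def positions():
--         r, c = start
--         for d in solution:
--             dr, dc = deltas.get(d, (0, -1))
--             r += dr
--             c += dc
--             yield r, c
--
--     # lazy, short-circuiting wall scan over the generated positions
--     if any(maze[r][c] == 1 for r, c in positions()):
--         return False
--     # endpoint in closed form from letter counts (no walk needed)
--     n = len(solution)
--     cN = solution.count('N')
--     cS = solution.count('S')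
--     cE = solution.count('E')
--     return (start[0] + cS - cN,
--             start[1] + cE - (n - cN - cS - cE)) == end
-- ===== Notes on version B (the rewrite author's own statement) =====
-- stated objective: alternative
-- what changed: B computes the endpoint in closed form from the counts of the direction letters (cS-cN rows, cE-cW columns) instead of reading it off the walk, and does the wall check as a short-circuiting any() over a lazy position generator driven by a delta table.
import Mathlib
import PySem

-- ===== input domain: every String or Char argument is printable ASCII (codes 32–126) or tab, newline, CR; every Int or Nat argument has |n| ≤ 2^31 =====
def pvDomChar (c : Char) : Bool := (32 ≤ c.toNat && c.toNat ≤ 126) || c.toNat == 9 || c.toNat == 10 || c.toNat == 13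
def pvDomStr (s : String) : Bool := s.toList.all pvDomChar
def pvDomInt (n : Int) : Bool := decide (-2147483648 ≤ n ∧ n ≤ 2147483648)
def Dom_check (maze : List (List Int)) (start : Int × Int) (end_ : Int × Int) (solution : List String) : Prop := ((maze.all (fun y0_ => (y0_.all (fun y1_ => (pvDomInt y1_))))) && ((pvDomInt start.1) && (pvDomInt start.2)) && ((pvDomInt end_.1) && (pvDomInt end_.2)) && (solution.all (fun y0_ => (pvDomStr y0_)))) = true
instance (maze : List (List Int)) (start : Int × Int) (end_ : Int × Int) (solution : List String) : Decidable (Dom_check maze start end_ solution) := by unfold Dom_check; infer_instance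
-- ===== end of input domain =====

-- B derives the endpoint in closed form from the direction-letter counts instead of from the
-- walk, and does the wall check as a short-circuiting scan over delta-generated positions;
-- objective: alternative algorithm for the endpoint, same cost.

-- ===== PORT A =====
def go_N (pos : Int × Int) : Int × Int := (pos.1 - 1, pos.2)
def go_S (pos : Int × Int) : Int × Int := (pos.1 + 1, pos.2)
def go_E (pos : Int × Int) : Int × Int := (pos.1, pos.2 + 1)
def go_W (pos : Int × Int) : Int × Int := (pos.1, pos.2 - 1)

-- A's loop; a failing index (Python IndexError) is excluded by Pre_check, the port returns false there.
def checkLoop (maze : List (List Int)) (end_ : Int × Int) (pos : Int × Int) : List String → Bool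
  | [] => decide (pos = end_)
  | direction :: rest =>
    let pos' :=
      if direction == "N" then go_N pos
      else if direction == "S" then go_S pos
      else if direction == "E" then go_E pos
      else go_W pos
    match (PySem.List.pyGet? maze pos'.1).bind (fun row => PySem.List.pyGet? row pos'.2) with
    | none => false
    | some v => if v == 1 then false else checkLoop maze end_ pos' rest

def check (maze : List (List Int)) (start : Int × Int) (end_ : Int × Int) (solution : List String) : Bool :=
  checkLoop maze end_ start solution

-- ===== PORT B =====
def pvDeltas : PySem.Dict String (Int × Int) :=
  PySem.Dict.ofList [("N", (-1, 0)), ("S", (1, 0)), ("E", (0, 1))]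

def pvStep (p : Int × Int) (d : String) : Int × Int :=
  let dd := pvDeltas.getD d (0, -1)
  (p.1 + dd.1, p.2 + dd.2)

-- maze[r][c] as an Option (none = Python IndexError, excluded by Pre_check; true there = abort-false)
def pvCell (maze : List (List Int)) (p : Int × Int) : Option Int :=
  (PySem.List.pyGet? maze p.1).bind (fun row => PySem.List.pyGet? row p.2)

-- Source B's any(maze[r][c] == 1 for r, c in positions()): lazy generated positions, short circuit
def pvAnyWall (maze : List (List Int)) (pos : Int × Int) : List String → Bool
  | [] => false
  | d :: rest =>
    let p' := pvStep pos d
    match pvCell maze p' with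
    | none => true
    | some v => if v == 1 then true else pvAnyWall maze p' rest

-- Source B's closed-form endpoint from the letter counts
def pvFinal (start : Int × Int) (solution : List String) : Int × Int :=
  let n : Int := solution.length
  let cN : Int := solution.count "N"
  let cS : Int := solution.count "S"
  let cE : Int := solution.count "E"
  (start.1 + cS - cN, start.2 + cE - (n - cN - cS - cE))

def check_alt (maze : List (List Int)) (start : Int × Int) (end_ : Int × Int) (solution : List String) : Bool :=
  if pvAnyWall maze start solution then false
  else decide (pvFinal start solution = end_)

-- ===== PRECONDITION & SPEC =====
def pvOkCell (maze : List (List Int)) (p : Int × Int) : Bool :=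
  match pvCell maze p with
  | some v => v != 1
  | none => false

def pvIsElse (s : String) : Bool := !(s == "N" || s == "S" || s == "E")

-- closed form: the position after i+1 steps, by counting direction letters in the prefix
def pvPosAt (start : Int × Int) (solution : List String) (i : Nat) : Int × Int :=
  let pre := solution.take (i + 1)
  (start.1 + (pre.count "S" : Int) - (pre.count "N" : Int),
   start.2 + (pre.count "E" : Int) - (pre.countP pvIsElse : Int))

-- Pre_check = exactly the inputs where Python A returns: every position the walk visits,
-- up to and including the first wall cell, is a valid (possibly negative, Python-style) index.
def Pre_check (maze : List (List Int)) (start : Int × Int) (end_ : Int × Int) (solution : List String) : Prop :=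
  ∀ i, i < solution.length →
    (∀ j, j < i → pvOkCell maze (pvPosAt start solution j) = true) →
    (pvCell maze (pvPosAt start solution i)).isSome = true

instance (maze : List (List Int)) (start : Int × Int) (end_ : Int × Int) (solution : List String) : Decidable (Pre_check maze start end_ solution) := by unfold Pre_check; infer_instance

def pvWitness_check : List (List Int) × (Int × Int) × (Int × Int) × List String :=
  ([[0, 0], [0, 0]], (0, 0), (0, 1), ["E"])

def Spec_check (maze : List (List Int)) (start : Int × Int) (end_ : Int × Int) (solution : List String) (out : Bool) : Prop := out = check_alt maze start end_ solution
instance (maze : List (List Int)) (start : Int × Int) (end_ : Int × Int) (solution : List String) (out : Bool) : Decidable (Spec_check maze start end_ solution out) := by unfold Spec_check; infer_instance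

-- ===== CLAIM (what is proved, stated in full; the proofs are below) =====
def Claim_equal_check : Prop := ∀ (maze : List (List Int)) (start : Int × Int) (end_ : Int × Int) (solution : List String), Dom_check maze start end_ solution → Pre_check maze start end_ solution → Spec_check maze start end_ solution (check maze start end_ solution)

-- ===== LEMMAS AND PROOFS =====

-- the three literal lookups in B's delta table, and the default case
theorem pvDeltas_N : pvDeltas.getD "N" (0, -1) = (-1, 0) := by decide
theorem pvDeltas_S : pvDeltas.getD "S" (0, -1) = (1, 0) := by decide
theorem pvDeltas_E : pvDeltas.getD "E" (0, -1) = (0, 1) := by decide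
theorem pvDeltas_else (d : String) (h1 : ¬ d = "N") (h2 : ¬ d = "S") (h3 : ¬ d = "E") :
    pvDeltas.getD d (0, -1) = (0, -1) := by
  have n1 : ("N" == d) = false := beq_eq_false_iff_ne.mpr (Ne.symm h1)
  have n2 : ("S" == d) = false := beq_eq_false_iff_ne.mpr (Ne.symm h2)
  have n3 : ("E" == d) = false := beq_eq_false_iff_ne.mpr (Ne.symm h3)
  simp [pvDeltas, PySem.Dict.getD, PySem.Dict.get?, PySem.Dict.ofList, PySem.Dict.update,
        PySem.Dict.empty, PySem.Dict.insert, PySem.Dict.contains, List.find?, n1, n2, n3]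

-- A's if/elif chain computes the same step as B's delta-table lookup.
theorem step_eq (pos : Int × Int) (d : String) :
    (if d == "N" then go_N pos
     else if d == "S" then go_S pos
     else if d == "E" then go_E pos
     else go_W pos) = pvStep pos d := by
  by_cases h1 : d = "N"
  · subst h1; simp [pvStep, pvDeltas_N, go_N, Prod.ext_iff]; try omega
  · by_cases h2 : d = "S"
    · subst h2; simp [pvStep, pvDeltas_S, go_S, Prod.ext_iff, h1]; try omega
    · by_cases h3 : d = "E"
      · subst h3; simp [pvStep, pvDeltas_E, go_E, Prod.ext_iff, h1, h2]; try omega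
      · simp [pvStep, pvDeltas_else d h1 h2 h3, go_W, Prod.ext_iff, h1, h2, h3]; try omega

-- peeling one step off the closed-form endpoint
theorem final_cons (pos : Int × Int) (d : String) (rest : List String) :
    pvFinal (pvStep pos d) rest = pvFinal pos (d :: rest) := by
  by_cases h1 : d = "N"
  · subst h1
    simp [pvFinal, pvStep, pvDeltas_N, List.count_cons, Prod.ext_iff]
    omega
  · by_cases h2 : d = "S"
    · subst h2
      simp [pvFinal, pvStep, pvDeltas_S, List.count_cons, h1, Prod.ext_iff]
      omega
    · by_cases h3 : d = "E"
      · subst h3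
        simp [pvFinal, pvStep, pvDeltas_E, List.count_cons, h1, h2, Prod.ext_iff]
        omega
      · simp [pvFinal, pvStep, pvDeltas_else d h1 h2 h3, List.count_cons,
              h1, h2, h3, Prod.ext_iff]
        omega

-- The interleaved loop equals wall-scan + closed-form endpoint, for any starting position.
theorem loop_eq (maze : List (List Int)) (end_ : Int × Int) :
    ∀ (sol : List String) (pos : Int × Int),
      checkLoop maze end_ pos sol =
        (if pvAnyWall maze pos sol then false
         else decide (pvFinal pos sol = end_)) := by
  intro sol
  induction sol with
  | nil =>
    intro pos
    have h : pvFinal pos [] = pos := by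
      simp [pvFinal, Prod.ext_iff]
    simp [checkLoop, pvAnyWall, h]
  | cons d rest ih =>
    intro pos
    rw [checkLoop, step_eq pos d]
    show (match pvCell maze (pvStep pos d) with
          | none => false
          | some v => if v == 1 then false else checkLoop maze end_ (pvStep pos d) rest) = _
    cases hc : pvCell maze (pvStep pos d) with
    | none => simp [pvAnyWall, hc]
    | some v =>
      by_cases hv : v == 1
      · simp [pvAnyWall, hc, hv]
      · rw [pvAnyWall]
        simp only [hc, hv, Bool.false_eq_true]
        rw [ih (pvStep pos d), final_cons]
        simp

-- ===== VERDICT (by name: the statement is the Claim_ definition above) =====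
theorem check_spec : Claim_equal_check := by
  intro maze start end_ solution _ _
  unfold Spec_check check check_alt
  exact loop_eq maze end_ solution start
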